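-- pv_equiv track=rewrite | github.com/njllljhfh/AI_SERVER | algorithms/algorithm3/task_person_algorithm_v12.py | people_group_selection
-- ===== SOURCE A (Python) =====
-- def people_group_selection(position_info, required_people):
--     selected_people = []
--     remaining_required_people = required_people
--     # 遍历岗位信息
--     for person, suitability in position_info.items():
--         # 如果适配度不为0且还需要更多人员
--         if suitability != 0 and remaining_required_people > 0:
--             selected_people.append(person)
--             remaining_required_people -= 1
--     return selected_people, max(0, remaining_required_people)
-- ===== SOURCE B (Python) =====
-- def people_group_selection(position_info, required_people):
--     def go(items, need):
--         # divide and conquer: pick eligible people from the left half first,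
--         # then fill the rest of the need from the right half
--         if need <= 0 or len(items) == 0:
--             return [], need
--         if len(items) == 1:
--             person, suitability = items[0]
--             if suitability != 0:
--                 return [person], need - 1
--             return [], need
--         mid = len(items) // 2
--         left_sel, need1 = go(items[:mid], need)
--         right_sel, need2 = go(items[mid:], need1)
--         return left_sel + right_sel, need2
--     sel, leftover = go(list(position_info.items()), required_people)
--     return sel, max(0, leftover)
-- ===== Notes on version B (the rewrite author's own statement) =====
-- stated objective: alternative
-- what changed: Replaces A's linear accumulator loop over every dict entry with a divide-and-conquer recursion: split the items in halves, select from the left half with the full need, fill the remainder from the right half with the leftover need, and concatenate; the recursion also stops descending once the need is exhausted.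
import Mathlib
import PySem

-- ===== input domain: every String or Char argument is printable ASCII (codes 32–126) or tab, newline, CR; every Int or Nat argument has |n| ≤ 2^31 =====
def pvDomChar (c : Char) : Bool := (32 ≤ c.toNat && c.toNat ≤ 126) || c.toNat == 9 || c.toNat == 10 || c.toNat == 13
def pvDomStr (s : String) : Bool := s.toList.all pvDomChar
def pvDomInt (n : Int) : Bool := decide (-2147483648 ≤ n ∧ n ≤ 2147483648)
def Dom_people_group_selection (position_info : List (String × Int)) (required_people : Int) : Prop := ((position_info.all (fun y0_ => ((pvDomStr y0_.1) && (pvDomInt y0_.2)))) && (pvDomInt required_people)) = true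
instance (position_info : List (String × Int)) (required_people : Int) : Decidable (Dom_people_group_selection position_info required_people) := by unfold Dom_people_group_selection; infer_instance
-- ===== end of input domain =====

-- B replaces A's linear accumulator loop with a divide-and-conquer recursion over halves of the item list (alternative decomposition).


-- ===== PORT A =====
-- loop over items with (selected_people, remaining_required_people) state
def people_group_selection (position_info : List (String × Int)) (required_people : Int) : List String × Int :=
  let st := position_info.foldl
    (fun (st : List String × Int) pr =>
      if pr.2 ≠ 0 ∧ st.2 > 0 then (st.1 ++ [pr.1], st.2 - 1) else st)
    ([], required_people)
  (st.1, max 0 st.2)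

-- ===== PORT B =====
-- divide-and-conquer helper go(items, need) from Source B; fuel (= initial list length) only
-- makes the halving recursion structural — the 0-fuel branch is unreachable when fuel ≥ l.length
def pgsGoAux (fuel : Nat) (l : List (String × Int)) (r : Int) : List String × Int :=
  if r ≤ 0 ∨ l.length = 0 then ([], r)
  else if l.length = 1 then
    let pr := l.headD ("", 0)
    if pr.2 ≠ 0 then ([pr.1], r - 1) else ([], r)
  else
    match fuel with
    | 0 => ([], r)
    | fuel' + 1 =>
      let mid := l.length / 2
      let res1 := pgsGoAux fuel' (l.take mid) r
      let res2 := pgsGoAux fuel' (l.drop mid) res1.2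
      (res1.1 ++ res2.1, res2.2)

def pgsGo (l : List (String × Int)) (r : Int) : List String × Int :=
  pgsGoAux l.length l r

def people_group_selection_alt (position_info : List (String × Int)) (required_people : Int) : List String × Int :=
  let res := pgsGo position_info required_people
  (res.1, max 0 res.2)

-- ===== PRECONDITION & SPEC =====
def Spec_people_group_selection (position_info : List (String × Int)) (required_people : Int) (out : List String × Int) : Prop := out = people_group_selection_alt position_info required_people
instance (position_info : List (String × Int)) (required_people : Int) (out : List String × Int) : Decidable (Spec_people_group_selection position_info required_people out) := by unfold Spec_people_group_selection; infer_instance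

-- ===== CLAIM =====
def Claim_equal_people_group_selection : Prop := ∀ (position_info : List (String × Int)) (required_people : Int), Dom_people_group_selection position_info required_people → Spec_people_group_selection position_info required_people (people_group_selection position_info required_people)

-- ===== LEMMAS AND PROOFS =====

-- "first max(r,0) eligible names" abbreviations used by both characterisations
def pgsElig (l : List (String × Int)) : List String :=
  (l.filter (fun pr => pr.2 ≠ 0)).map Prod.fst

def pgsSel (l : List (String × Int)) (r : Int) : List String :=
  (pgsElig l).take (max r 0).toNat

-- Characterisation of A's loop
theorem pgs_foldl_char (l : List (String × Int)) (acc : List String) (r : Int) :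
    l.foldl
      (fun (st : List String × Int) pr =>
        if pr.2 ≠ 0 ∧ st.2 > 0 then (st.1 ++ [pr.1], st.2 - 1) else st)
      (acc, r)
    = (acc ++ pgsSel l r, r - (pgsSel l r).length) := by
  induction l generalizing acc r with
  | nil => simp [pgsSel, pgsElig]
  | cons hd tl ih =>
    by_cases hs : hd.2 = 0
    · simp [List.foldl_cons, hs, ih, pgsSel, pgsElig]
    · by_cases hr : r > 0
      · have hnat : (max r 0).toNat = (max (r - 1) 0).toNat + 1 := by omega
        simp only [List.foldl_cons, if_pos (And.intro hs hr), ih, pgsSel, pgsElig,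
          List.filter_cons, hs, decide_not]
        simp [hnat]
        omega
      · have hnat : (max r 0).toNat = 0 := by omega
        simp only [List.foldl_cons]
        rw [if_neg (by tauto)]
        rw [ih]
        simp [pgsSel, pgsElig, hnat, hs]

-- pgsElig distributes over append
theorem pgsElig_append (a b : List (String × Int)) :
    pgsElig (a ++ b) = pgsElig a ++ pgsElig b := by
  simp [pgsElig]

-- Characterisation of B's divide-and-conquer (with enough fuel)
theorem pgsGoAux_char (fuel : Nat) : ∀ (l : List (String × Int)) (r : Int), l.length ≤ fuel →
    pgsGoAux fuel l r = (pgsSel l r, r - (pgsSel l r).length) := by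
  induction fuel with
  | zero =>
    intro l r hf
    have hl : l = [] := List.length_eq_zero_iff.mp (Nat.le_zero.mp hf)
    subst hl
    rw [pgsGoAux]
    simp [pgsSel, pgsElig]
  | succ fuel ih =>
    intro l r hf
    by_cases h : r ≤ 0 ∨ l.length = 0
    · rw [pgsGoAux, if_pos h]
      rcases h with h | h
      · have : (max r 0).toNat = 0 := by omega
        simp [pgsSel, this]
      · have : l = [] := List.length_eq_zero_iff.mp h
        simp [this, pgsSel, pgsElig]
    · by_cases h1 : l.length = 1
      · obtain ⟨q, rfl⟩ := List.length_eq_one_iff.mp h1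
        have hr : 0 < r := by rcases not_or.mp h with ⟨h2, _⟩; omega
        rw [pgsGoAux, if_neg h, if_pos h1]
        by_cases hs : q.2 = 0
        · simp [hs, pgsSel, pgsElig]
        · obtain ⟨k, hk⟩ : ∃ k, (max r 0).toNat = k + 1 := ⟨(max r 0).toNat - 1, by omega⟩
          simp [hs, pgsSel, pgsElig, hk]
      · rw [pgsGoAux, if_neg h, if_neg h1]
        dsimp only
        have hlen2 : 2 ≤ l.length := by
          rcases not_or.mp h with ⟨_, h0⟩; omega
        have hft : (l.take (l.length / 2)).length ≤ fuel := by
          simp only [List.length_take]; omega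
        have hfd : (l.drop (l.length / 2)).length ≤ fuel := by
          simp only [List.length_drop]; omega
        have hr : 0 < r := by rcases not_or.mp h with ⟨h2, _⟩; omega
        have hsplit : l = l.take (l.length / 2) ++ l.drop (l.length / 2) :=
          (List.take_append_drop _ l).symm
        have helig : pgsElig l
            = pgsElig (l.take (l.length / 2)) ++ pgsElig (l.drop (l.length / 2)) := by
          conv_lhs => rw [hsplit, pgsElig_append]
        have hlen1 : (pgsSel (l.take (l.length / 2)) r).length ≤ (max r 0).toNat := by
          simp [pgsSel]
        have hr1 : (max (r - (pgsSel (l.take (l.length / 2)) r).length) 0).toNat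
            = (max r 0).toNat - (pgsSel (l.take (l.length / 2)) r).length := by omega
        have hlenE : (pgsSel (l.take (l.length / 2)) r).length
            = min (max r 0).toNat (pgsElig (l.take (l.length / 2))).length := by
          simp [pgsSel]
        have hsub : (max r 0).toNat - (pgsElig (l.take (l.length / 2))).length
            = (max r 0).toNat - (pgsSel (l.take (l.length / 2)) r).length := by omega
        have htk : pgsSel l r = pgsSel (l.take (l.length / 2)) r
            ++ (pgsElig (l.drop (l.length / 2))).take
                ((max r 0).toNat - (pgsSel (l.take (l.length / 2)) r).length) := by
          rw [pgsSel, helig, List.take_append, hsub]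
          rfl
        rw [ih _ r hft]
        dsimp only
        rw [ih _ _ hfd]
        dsimp only
        have hsel2 : pgsSel (l.drop (l.length / 2)) (r - (pgsSel (l.take (l.length / 2)) r).length)
            = (pgsElig (l.drop (l.length / 2))).take
                ((max r 0).toNat - (pgsSel (l.take (l.length / 2)) r).length) := by
          rw [pgsSel, hr1]
        rw [hsel2]
        refine Prod.ext ?_ ?_
        · exact htk.symm
        · rw [htk]
          simp only [List.length_append]
          push_cast
          ring

theorem pgsGo_char (l : List (String × Int)) (r : Int) :
    pgsGo l r = (pgsSel l r, r - (pgsSel l r).length) := by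
  exact pgsGoAux_char l.length l r le_rfl

-- ===== VERDICT =====
theorem people_group_selection_spec : Claim_equal_people_group_selection := by
  intro position_info required_people _
  unfold Spec_people_group_selection people_group_selection people_group_selection_alt
  simp only [pgs_foldl_char, pgsGo_char, List.nil_append]
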